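-- pv_equiv track=rewrite | github.com/albancolley/aoc | aoc2023/01/task.py | calc_2
-- ===== SOURCE A (Python) =====
-- word_digits = {'one': 1, '1': 1,
--                'two': 2, '2':2,
--                'three': 3, '3':3,
--                'four': 4, '4':4,
--                'five': 5, '5':5,
--                'six': 6, '6':6,
--                'seven': 7, '7': 7,
--                'eight': 8, '8': 8,
--                'nine': 9, '9' : 9
--                }
--
-- def calc_2(data: [str]) -> int:
--     total = 0
--     for item in data:
--         value = 0
--         found = False
--         for i in range(len(item)):
--             for k in word_digits:
--                 if item[i:].startswith(k):
--                     value += 10 * word_digits[k]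
--                     found = True
--                     break
--             if found:
--                 break
--
--         found = False
--         for i in range(len(item) - 1, -1, -1):
--             for k in word_digits:
--                 if item[i:].startswith(k):
--                     value += 1 * word_digits[k]
--                     found = True
--                     break
--             if found:
--                 break
--
--         total += value
--
--     return total
-- ===== SOURCE B (Python) =====
-- word_digits = {'one': 1, '1': 1,
--                'two': 2, '2': 2,
--                'three': 3, '3': 3,
--                'four': 4, '4': 4,
--                'five': 5, '5': 5,
--                'six': 6, '6': 6,
--                'seven': 7, '7': 7,
--                'eight': 8, '8': 8,
--                'nine': 9, '9': 9
--                }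
--
-- def calc_2(data):
--     total = 0
--     for item in data:
--         values = []
--         for i in range(len(item)):
--             for k, v in word_digits.items():
--                 if item.startswith(k, i):
--                     values.append(v)
--                     break
--         if values:
--             total += 10 * values[0] + values[-1]
--     return total
-- ===== Notes on version B (the rewrite author's own statement) =====
-- stated objective: simpler
-- what changed: Replaces A's two directional early-exit scans (forward and backward, each with a found flag and nested breaks) with a single forward pass that records every match into a list and then reads off 10*values[0] + values[-1], guarding the empty case.
import Mathlib
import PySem

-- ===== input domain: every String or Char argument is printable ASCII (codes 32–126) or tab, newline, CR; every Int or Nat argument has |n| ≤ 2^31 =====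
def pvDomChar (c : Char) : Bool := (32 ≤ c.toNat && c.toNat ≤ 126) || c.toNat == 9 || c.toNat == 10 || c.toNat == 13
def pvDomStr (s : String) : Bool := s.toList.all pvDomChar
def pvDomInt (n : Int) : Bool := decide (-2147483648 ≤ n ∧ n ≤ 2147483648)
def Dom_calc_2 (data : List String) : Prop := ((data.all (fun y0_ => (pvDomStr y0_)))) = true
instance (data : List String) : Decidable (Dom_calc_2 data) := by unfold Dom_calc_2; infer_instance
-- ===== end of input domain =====

-- B replaces A's two directional early-exit scans with one forward pass collecting all
-- matches and reading off first/last — simpler, same cost; return value only, no mutation.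

-- ===== PORT A =====
-- the module-level dict word_digits, in insertion order (keys as char lists)
def wordDigits : List (List Char × Int) :=
  [(['o','n','e'], 1), (['1'], 1),
   (['t','w','o'], 2), (['2'], 2),
   (['t','h','r','e','e'], 3), (['3'], 3),
   (['f','o','u','r'], 4), (['4'], 4),
   (['f','i','v','e'], 5), (['5'], 5),
   (['s','i','x'], 6), (['6'], 6),
   (['s','e','v','e','n'], 7), (['7'], 7),
   (['e','i','g','h','t'], 8), (['8'], 8),
   (['n','i','n','e'], 9), (['9'], 9)]

-- A's inner 'for k in word_digits: if item[i:].startswith(k): … break' = first matching key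
def firstKeyA (s : List Char) : Option Int :=
  (wordDigits.find? (fun kv => PySem.Chars.startswith s kv.1)).map Prod.snd

-- A's forward loop over i in range(len(item)) with the found flag / break
def fwdA (cs : List Char) : List Int → Int
  | [] => 0
  | i :: rest =>
    match firstKeyA (PySem.List.slice cs (some i) none) with
    | some v => 10 * v
    | none => fwdA cs rest

-- A's backward loop over i in range(len(item)-1, -1, -1) with the found flag / break
def bwdA (cs : List Char) : List Int → Int
  | [] => 0
  | i :: rest =>
    match firstKeyA (PySem.List.slice cs (some i) none) with
    | some v => 1 * v
    | none => bwdA cs rest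

def calc_2 (data : List String) : Int :=
  data.foldl
    (fun total item =>
      let cs := item.toList
      total + (fwdA cs (PySem.List.pyRange 0 cs.length 1)
               + bwdA cs (PySem.List.pyRange ((cs.length : Int) - 1) (-1) (-1))))
    0

-- ===== PORT B =====
-- B's inner loop 'for k, v in word_digits.items(): if item.startswith(k, i): values.append(v); break'
def firstKeyB (s : List Char) : List (List Char × Int) → Option Int
  | [] => none
  | (k, v) :: rest => if PySem.Chars.startswith s k then some v else firstKeyB s rest

-- B's single forward pass collecting every positional match into values
def valuesB (cs : List Char) : List Int :=
  (PySem.List.pyRange 0 cs.length 1).filterMap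
    (fun i => firstKeyB (PySem.List.slice cs (some i) none) wordDigits)

def calc_2_alt (data : List String) : Int :=
  data.foldl
    (fun total item =>
      let vs := valuesB item.toList
      if vs.isEmpty then total else total + (10 * vs.headD 0 + vs.getLastD 0))
    0

-- ===== PRECONDITION & SPEC =====
def Spec_calc_2 (data : List String) (out : Int) : Prop := out = calc_2_alt data
instance (data : List String) (out : Int) : Decidable (Spec_calc_2 data out) := by unfold Spec_calc_2; infer_instance

-- ===== CLAIM (what is proved, stated in full; the proofs are below) =====
def Claim_equal_calc_2 : Prop := ∀ (data : List String), Dom_calc_2 data → Spec_calc_2 data (calc_2 data)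

-- ===== LEMMAS AND PROOFS =====

-- A's find?-over-the-dict equals B's explicit first-match recursion
theorem firstKey_eq (s : List Char) :
    ∀ l : List (List Char × Int),
      (l.find? (fun kv => PySem.Chars.startswith s kv.1)).map Prod.snd = firstKeyB s l := by
  intro l
  induction l with
  | nil => simp [firstKeyB]
  | cons kv rest ih =>
    obtain ⟨k, v⟩ := kv
    by_cases h : PySem.Chars.startswith s k
    · simp [List.find?, firstKeyB, h]
    · simp [List.find?, firstKeyB, h, ih]

-- the forward early-exit scan returns 10 × the first collected match (0 if none)
theorem fwdA_eq (cs : List Char) (L : List Int) :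
    fwdA cs L =
      match (L.filterMap (fun i => firstKeyA (PySem.List.slice cs (some i) none))).head? with
      | some v => 10 * v
      | none => 0 := by
  induction L with
  | nil => simp [fwdA]
  | cons i rest ih =>
    cases h : firstKeyA (PySem.List.slice cs (some i) none) with
    | some v => simp [fwdA, h]
    | none => simp [fwdA, h, ih]

-- the backward early-exit scan (on a reversed index list) returns the last collected match
theorem bwdA_eq (cs : List Char) (L : List Int) :
    bwdA cs L =
      match (L.filterMap (fun i => firstKeyA (PySem.List.slice cs (some i) none))).head? with
      | some v => v
      | none => 0 := by
  induction L with
  | nil => simp [bwdA]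
  | cons i rest ih =>
    cases h : firstKeyA (PySem.List.slice cs (some i) none) with
    | some v => simp [bwdA, h]
    | none => simp [bwdA, h, ih]

-- per-string agreement: A's two scans compute B's 10*first + last (0 when no match)
theorem item_eq (cs : List Char) :
    fwdA cs (PySem.List.pyRange 0 cs.length 1)
      + bwdA cs (PySem.List.pyRange ((cs.length : Int) - 1) (-1) (-1))
    = (if (valuesB cs).isEmpty then 0
       else 10 * (valuesB cs).headD 0 + (valuesB cs).getLastD 0) := by
  have hrev : PySem.List.pyRange ((cs.length : Int) - 1) (-1) (-1)
      = (PySem.List.pyRange 0 cs.length 1).reverse := by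
    rw [PySem.List.pyRange_neg_one_eq_reverse]; norm_num
  have hB : valuesB cs
      = (PySem.List.pyRange 0 cs.length 1).filterMap
          (fun i => firstKeyA (PySem.List.slice cs (some i) none)) := by
    unfold valuesB
    exact List.filterMap_congr (fun i _ => (firstKey_eq _ wordDigits).symm)
  rw [fwdA_eq, hrev, bwdA_eq, List.filterMap_reverse, List.head?_reverse, ← hB]
  cases hvs : valuesB cs with
  | nil => simp
  | cons v rest =>
    rw [List.getLastD_eq_getLast?]
    cases h2 : (v :: rest).getLast? with
    | none => simp at h2
    | some x => simp

-- ===== VERDICT (by name: the statement is the Claim_ definition above) =====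
theorem calc_2_spec : Claim_equal_calc_2 := by
  intro data _
  unfold Spec_calc_2 calc_2 calc_2_alt
  congr 1
  funext total item
  have h := item_eq item.toList
  dsimp only
  rw [h]
  split_ifs <;> omega
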